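-- pv_equiv track=rewrite | github.com/davidgrcr/criptografia_uoc | PRAC1/P2022_Practica1_Skeleton.py | uoc_find_alphabet
-- ===== SOURCE A (Python) =====
-- freq2 = "EAOSNRLDUICTMBPQYHGVFZJXKW"
--
-- def find_all_occurrences(ch, txt):
--     occurrence = 0
--     for i in range(len(txt)):
--         if txt[i] == ch:
--             occurrence += 1
--     return occurrence
--
-- def uoc_find_alphabet(message):
--     """
--     EXERCISE 2.2: Find or approximate the used substitution alphabet
--     :message: encrypted message
--     :return: estimated substitution alphabet
--     """
--
--     subs_alphabet = ""
--
--     #### IMPLEMENTATION GOES HERE ####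
--     dictionary = {}
--
--     # Busquem totes les vegades que tenim cada caracter en el text, i ho guardem en un diccionari per tal de poder ordenar els
--     # caràcters en ordre descent pel nombre de vegades que han aparegut cada caràcter.
--     for i in range(len(freq2)):
--         occurrences = find_all_occurrences(freq2[i], message)
--         dictionary[freq2[i]] = occurrences
--
--     sorted_dic = dict(sorted(dictionary.items(), key=lambda item: item[1], reverse=True))
--
--     # Obtenim les claus ja previament ordenades i les posem en un nou diccionari clau:valor,
--     # Llavors fem que les claus siguin els caràcters que em trobat ordenats i el valor sigui
--     # el caràcter segons la cadena de distribució de freqüències que li toca per l'ordre que té.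
--     keys_values = sorted_dic.keys()
--     alphabet_dictionary = {}
--
--     for i, key in enumerate(keys_values):
--         alphabet_dictionary[key] = freq2[i]
--
--     # Ordenem el segon diccionari pels valors que ens marca la cadena de distribució de freqüències
--     # que previament haviem trobat, i ho retornem com a string finalment.
--     sorted_dic2 = dict(sorted(alphabet_dictionary.items(), key=lambda item: item[1], reverse=False))
--
--     subs_alphabet = "".join(sorted_dic2.keys())
--     # --------------------------------
--     return subs_alphabet
-- ===== SOURCE B (Python) =====
-- freq2 = "EAOSNRLDUICTMBPQYHGVFZJXKW"
--
-- def uoc_find_alphabet(message):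
--     # Sort-free: count chars in one pass, then give each letter its rank by
--     # counting the letters that must precede it (higher count, or equal count
--     # and earlier in freq2), and place it directly at its final slot.
--     counts = {}
--     for ch in message:
--         counts[ch] = counts.get(ch, 0) + 1
--     result = [''] * 26
--     for i, c in enumerate(freq2):
--         rank = 0
--         for j, d in enumerate(freq2):
--             if counts.get(d, 0) > counts.get(c, 0) or (counts.get(d, 0) == counts.get(c, 0) and j < i):
--                 rank += 1
--         result[ord(freq2[rank]) - ord('A')] = c
--     return ''.join(result)
-- ===== Notes on version B (the rewrite author's own statement) =====
-- stated objective: alternative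
-- what changed: A builds a dict of per-letter counts via 26 repeated full-text scans and obtains the alphabet through two dict-rebuilding sort passes (sort by count descending, then sort by assigned letter); B never sorts: it counts all characters in one pass over the message, computes each letter's rank directly by counting the letters that must precede it (strictly higher count, or equal count and earlier in freq2), and writes the letter straight into its final slot of a 26-cell array.
import Mathlib
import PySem

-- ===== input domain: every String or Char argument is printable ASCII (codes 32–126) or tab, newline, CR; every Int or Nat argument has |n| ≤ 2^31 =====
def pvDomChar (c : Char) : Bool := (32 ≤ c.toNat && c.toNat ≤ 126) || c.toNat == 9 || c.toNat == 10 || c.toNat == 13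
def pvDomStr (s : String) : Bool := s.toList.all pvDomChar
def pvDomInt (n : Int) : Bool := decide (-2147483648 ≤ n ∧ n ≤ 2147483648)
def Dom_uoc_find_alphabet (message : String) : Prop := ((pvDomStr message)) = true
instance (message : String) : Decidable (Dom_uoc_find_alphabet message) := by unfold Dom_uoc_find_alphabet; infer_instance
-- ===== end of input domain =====

-- B is sort-free: it counts characters in one pass (instead of A's 26 full-text scans), gives each
-- letter its rank by counting the letters that must precede it, and writes it straight into its final
-- slot, with no sorting (objective: alternative; a timing run measured B faster by a constant factor).

-- ===== PORT A =====
-- the module constant freq2 = "EAOSNRLDUICTMBPQYHGVFZJXKW", as its character list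
def pvFreq2 : List Char := ['E','A','O','S','N','R','L','D','U','I','C','T','M','B','P','Q','Y','H','G','V','F','Z','J','X','K','W']

def find_all_occurrences (ch : Char) (txt : List Char) : Int :=
  (PySem.List.pyRange 0 (PySem.List.len txt) 1).foldl
    (fun occurrence i => if PySem.List.pyGetD txt i ' ' == ch then occurrence + 1 else occurrence) 0

def uoc_find_alphabet (message : String) : String :=
  let dictionary := (PySem.List.pyRange 0 (PySem.List.len pvFreq2) 1).foldl
    (fun d i => d.insert (PySem.List.pyGetD pvFreq2 i ' ')
      (find_all_occurrences (PySem.List.pyGetD pvFreq2 i ' ') message.toList))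
    PySem.Dict.empty
  let sorted_dic := PySem.Dict.ofList (PySem.List.sorted dictionary.items (fun item => item.2) true)
  let keys_values := sorted_dic.keys
  let alphabet_dictionary := (PySem.List.enumerate keys_values 0).foldl
    (fun d p => d.insert p.2 (PySem.List.pyGetD pvFreq2 p.1 ' ')) PySem.Dict.empty
  let sorted_dic2 := PySem.Dict.ofList (PySem.List.sorted alphabet_dictionary.items (fun item => item.2) false)
  String.mk sorted_dic2.keys  -- "".join over the one-character keys is their concatenation

-- ===== PORT B =====
def uoc_find_alphabet_alt (message : String) : String :=
  let counts : PySem.Dict Char Int :=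
    message.toList.foldl (fun d ch => d.insert ch (d.getD ch 0 + 1)) PySem.Dict.empty
  -- [''] * 26 : every slot is overwritten, so the placeholder char stands for Python's ''
  let result := (PySem.List.enumerate pvFreq2 0).foldl
    (fun (res : List Char) (p : Int × Char) =>
      let rank : Int := (PySem.List.enumerate pvFreq2 0).foldl
        (fun (r : Int) (q : Int × Char) =>
          if counts.getD q.2 0 > counts.getD p.2 0 ∨
             (counts.getD q.2 0 = counts.getD p.2 0 ∧ q.1 < p.1)
          then r + 1 else r) 0
      PySem.List.pySetD res
        (((PySem.List.pyGetD pvFreq2 rank ' ').toNat : Int) - ('A'.toNat : Int)) p.2)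
    (List.replicate 26 ' ')
  String.mk result  -- "".join over the one-character strings

-- ===== PRECONDITION & SPEC =====
def Spec_uoc_find_alphabet (message : String) (out : String) : Prop := out = uoc_find_alphabet_alt message
instance (message : String) (out : String) : Decidable (Spec_uoc_find_alphabet message out) := by unfold Spec_uoc_find_alphabet; infer_instance

-- ===== CLAIM (what is proved, stated in full; the proofs are below) =====
def Claim_equal_uoc_find_alphabet : Prop := ∀ (message : String), Dom_uoc_find_alphabet message → Spec_uoc_find_alphabet message (uoc_find_alphabet message)

-- ===== LEMMAS AND PROOFS =====

-- find_all_occurrences counts the occurrences of ch in txt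
theorem fao_eq (ch : Char) (txt : List Char) :
    find_all_occurrences ch txt = (List.count ch txt : Int) := by
  unfold find_all_occurrences
  rw [PySem.List.foldl_pyRange_zero_pyGetD txt ' '
    (fun occurrence x => if x == ch then occurrence + 1 else occurrence) 0]
  rw [PySem.List.foldl_count_if (fun x => x == ch) txt 0]
  simp [List.count]

-- dict(pairs) keeps the pair list unchanged when the keys are distinct
theorem items_ofList_nodup {w : Type} (l : List (Char × w)) (h : (l.map Prod.fst).Nodup) :
    (PySem.Dict.ofList l).items = l := by
  unfold PySem.Dict.ofList PySem.Dict.update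
  rw [PySem.Dict.items_foldl_insert_fresh (κ := Char) (ν := w) l Prod.fst Prod.snd
    PySem.Dict.empty (fun x _ => PySem.Dict.contains_empty _) h]
  simp [PySem.Dict.empty]

theorem keys_ofList_nodup {w : Type} (l : List (Char × w)) (h : (l.map Prod.fst).Nodup) :
    (PySem.Dict.ofList l).keys = l.map Prod.fst := by
  simp [PySem.Dict.keys, items_ofList_nodup l h]

-- a stable sort of a mapped list is the mapped stable sort under the composed key
theorem insertBy_map {a b : Type} (bo : a → a → Bool) (bo' : b → b → Bool) (f : a → b)
    (hb : ∀ x y, bo' (f x) (f y) = bo x y) (x : a) (ys : List a) :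
    PySem.List.insertBy bo' (f x) (ys.map f) = (PySem.List.insertBy bo x ys).map f := by
  induction ys with
  | nil => rfl
  | cons y ys ih =>
    simp only [List.map_cons, PySem.List.insertBy, hb]
    by_cases h : bo x y
    · simp [h]
    · simp [h, ih]

theorem foldl_insertBy_map {a b : Type} (bo : a → a → Bool) (bo' : b → b → Bool) (f : a → b)
    (hb : ∀ x y, bo' (f x) (f y) = bo x y) (xs : List a) (acc : List a) :
    (xs.map f).foldl (fun acc x => PySem.List.insertBy bo' x acc) (acc.map f)
      = (xs.foldl (fun acc x => PySem.List.insertBy bo x acc) acc).map f := by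
  induction xs generalizing acc with
  | nil => rfl
  | cons x xs ih =>
    simp only [List.map_cons, List.foldl_cons, insertBy_map bo bo' f hb]
    exact ih _

theorem sorted_map {a b k : Type} [LT k] [DecidableLT k] (f : a → b) (xs : List a)
    (key : b → k) (rev : Bool) :
    PySem.List.sorted (xs.map f) key rev = (PySem.List.sorted xs (fun x => key (f x)) rev).map f := by
  cases rev with
  | false =>
    rw [PySem.List.sorted_eq_foldl_insertBy, PySem.List.sorted_eq_foldl_insertBy]
    exact foldl_insertBy_map _ _ f (fun x y => rfl) xs []
  | true =>
    rw [PySem.List.sorted_rev_eq_foldl_insertBy, PySem.List.sorted_rev_eq_foldl_insertBy]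
    exact foldl_insertBy_map _ _ f (fun x y => rfl) xs []

set_option maxHeartbeats 2000000 in
set_option maxRecDepth 16384 in
-- A's decorate–sort-by-value–project over any 26-letter ranked list R is a direct scatter
theorem scatter_eq (R : List Char) (hlen : R.length = 26) :
    ((PySem.List.sorted ((PySem.List.enumerate R 0).map
        (fun p => (p.2, PySem.List.pyGetD pvFreq2 p.1 ' '))) (fun item => item.2) false).map Prod.fst)
    = (PySem.List.enumerate R 0).foldl
        (fun res p => PySem.List.pySetD res
          (((PySem.List.pyGetD pvFreq2 p.1 ' ').toNat : Int) - ('A'.toNat : Int)) p.2)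
        (List.replicate 26 ' ') := by
  rcases R with _|⟨r0, _|⟨r1, _|⟨r2, _|⟨r3, _|⟨r4, _|⟨r5, _|⟨r6, _|⟨r7, _|⟨r8, _|⟨r9, _|⟨r10, _|⟨r11, _|⟨r12, _|⟨r13, _|⟨r14, _|⟨r15, _|⟨r16, _|⟨r17, _|⟨r18, _|⟨r19, _|⟨r20, _|⟨r21, _|⟨r22, _|⟨r23, _|⟨r24, _|⟨r25, T⟩⟩⟩⟩⟩⟩⟩⟩⟩⟩⟩⟩⟩⟩⟩⟩⟩⟩⟩⟩⟩⟩⟩⟩⟩⟩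
  all_goals try (exfalso; simp at hlen; done)
  simp only [List.length_cons] at hlen
  rw [show T = [] from by simpa using hlen]
  simp [PySem.List.sorted, PySem.List.insertBy, PySem.List.enumerate, pvFreq2,
    PySem.List.pyGetD, PySem.List.pyIdx?, PySem.List.pySetD, PySem.List.pySet?, List.replicate]

-- ---------- stability of PySem's reverse insertion sort, as a rank formula ----------

theorem sorted_rev_append_singleton {a : Type} (key : a → Int) (xs : List a) (x : a) :
    PySem.List.sorted (xs ++ [x]) key true
      = PySem.List.insertBy (fun u v => decide (key v < key u)) x
          (PySem.List.sorted xs key true) := by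
  rw [PySem.List.sorted_rev_eq_foldl_insertBy, PySem.List.sorted_rev_eq_foldl_insertBy,
    List.foldl_append]
  rfl

-- insertBy splits the list at the first element the new one must precede
theorem insertBy_eq_takeWhile {a : Type} (bo : a → a → Bool) (x : a) (l : List a) :
    PySem.List.insertBy bo x l
      = l.takeWhile (fun y => !bo x y) ++ x :: l.dropWhile (fun y => !bo x y) := by
  induction l with
  | nil => rfl
  | cons y ys ih =>
    by_cases h : bo x y = true
    · simp [PySem.List.insertBy, h]
    · simp [PySem.List.insertBy, h, ih]

-- on a key-descending list, the takeWhile prefix of "not below t" is everything not below t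
theorem length_takeWhile_pairwise {a : Type} (key : a → Int) (t : Int) (l : List a)
    (hp : l.Pairwise (fun u v => key v ≤ key u)) :
    (l.takeWhile (fun y => !decide (key y < t))).length
      = l.countP (fun y => !decide (key y < t)) := by
  induction l with
  | nil => rfl
  | cons u l ih =>
    rcases List.pairwise_cons.mp hp with ⟨hu, hl⟩
    by_cases h : key u < t
    · have hz : l.countP (fun y => !decide (key y < t)) = 0 := by
        rw [List.countP_eq_zero]
        intro b hb
        have := hu b hb
        simp only [Bool.not_eq_true', decide_eq_false_iff_not, not_not]
        omega
      simp [List.countP_cons, h, hz]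
    · simp [List.countP_cons, h, ih hl]

-- on a key-descending list, everything in the dropWhile suffix is below t
theorem mem_dropWhile_pairwise {a : Type} (key : a → Int) (t : Int) (l : List a)
    (hp : l.Pairwise (fun u v => key v ≤ key u)) :
    ∀ c ∈ l.dropWhile (fun y => !decide (key y < t)), key c < t := by
  induction l with
  | nil => intro c hc; simp at hc
  | cons u l ih =>
    rcases List.pairwise_cons.mp hp with ⟨hu, hl⟩
    intro c hc
    by_cases h : key u < t
    · rw [List.dropWhile_cons] at hc
      simp only [h, decide_true, Bool.not_true, if_false, Bool.false_eq_true] at hc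
      rcases List.mem_cons.mp hc with rfl | hc
      · exact h
      · have := hu c hc; omega
    · rw [List.dropWhile_cons] at hc
      simp only [h, decide_false, Bool.not_false, if_true] at hc
      exact ih hl c hc

-- "not below t" splits into "strictly above t" plus "equal to t"
theorem countP_not_lt_split {a : Type} (key : a → Int) (t : Int) (l : List a) :
    l.countP (fun y => !decide (key y < t))
      = l.countP (fun y => decide (t < key y)) + l.countP (fun y => decide (key y = t)) := by
  induction l with
  | nil => rfl
  | cons u l ih =>
    simp only [List.countP_cons, ih]
    rcases lt_trichotomy (key u) t with h | h | h
    · simp [h, ne_of_lt h, not_lt.mpr (le_of_lt h)]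
    · simp [h]; omega
    · simp [h, ne_of_gt h, not_lt.mpr (le_of_lt h)]
      omega

-- the position of c in the stable descending sort counts the elements that beat it:
-- strictly larger key anywhere, or equal key earlier in the original list
theorem idxOf_sorted_rev (key : Char → Int) (xs : List Char) (hnd : xs.Nodup)
    (c : Char) (hc : c ∈ xs) :
    (PySem.List.sorted xs key true).idxOf c
      = xs.countP (fun d => decide (key c < key d))
        + (xs.take (xs.idxOf c)).countP (fun d => decide (key d = key c)) := by
  induction xs using List.reverseRecOn with
  | nil => simp at hc
  | append_singleton xs x ih =>
    have hxs : xs.Nodup := (List.nodup_append.mp hnd).1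
    have hx : x ∉ xs := by
      intro h
      rcases List.nodup_append.mp hnd with ⟨-, -, hdis⟩
      exact hdis x h x (List.mem_singleton_self x) rfl
    have hSperm : (PySem.List.sorted xs key true).Perm xs := PySem.List.sorted_perm xs key true
    have hSpair := PySem.List.sorted_pairwise_rev xs key
    have hxS : x ∉ PySem.List.sorted xs key true := fun h => hx (hSperm.mem_iff.mp h)
    rw [sorted_rev_append_singleton, insertBy_eq_takeWhile]
    have hbo : (fun y => !(fun u v => decide (key v < key u)) x y) = (fun y => !decide (key y < key x)) := rfl
    rw [hbo]
    set S := PySem.List.sorted xs key true with hSdef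
    set p : Char → Bool := fun y => !decide (key y < key x) with hpdef
    have hTD : S.takeWhile p ++ S.dropWhile p = S := List.takeWhile_append_dropWhile
    have hxT : x ∉ S.takeWhile p := fun h => hxS (by rw [← hTD]; exact List.mem_append_left _ h)
    have hTlen : (S.takeWhile p).length = S.countP p :=
      length_takeWhile_pairwise key (key x) S hSpair
    have hcountS : S.countP p = xs.countP p := hSperm.countP_eq p
    rcases List.mem_append.mp hc with hcx | hcx
    · -- c already in xs
      have hcne : c ≠ x := fun h => hx (h ▸ hcx)
      have hcS : c ∈ S := hSperm.mem_iff.mpr hcx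
      have hidx_new : (xs ++ [x]).idxOf c = xs.idxOf c := by
        rw [List.idxOf_append, if_pos hcx]
      have htake_new : (xs ++ [x]).take ((xs ++ [x]).idxOf c) = xs.take (xs.idxOf c) := by
        rw [hidx_new, List.take_append_of_le_length List.idxOf_le_length]
      have hcount_new : (xs ++ [x]).countP (fun d => decide (key c < key d))
          = xs.countP (fun d => decide (key c < key d))
            + (if key c < key x then 1 else 0) := by
        rw [List.countP_append]; simp [List.countP_cons]
      rw [hidx_new] at htake_new ⊢
      rw [htake_new] at *
      rw [hcount_new]
      by_cases hcT : c ∈ S.takeWhile p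
      · -- key x ≤ key c, position unchanged
        have hpc : p c = true := List.mem_takeWhile_imp hcT
        have hnlt : ¬ key c < key x := by
          rw [hpdef] at hpc; simpa using hpc
        have hl : (S.takeWhile p ++ x :: S.dropWhile p).idxOf c = (S.takeWhile p).idxOf c := by
          rw [List.idxOf_append, if_pos hcT]
        have hl2 : S.idxOf c = (S.takeWhile p).idxOf c := by
          conv_lhs => rw [← hTD]
          rw [List.idxOf_append, if_pos hcT]
        rw [hl, ← hl2, ih hxs hcx]
        simp [hnlt]
      · -- key c < key x, position shifts by one
        have hcD : c ∈ S.dropWhile p := by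
          rcases List.mem_append.mp (by rw [hTD]; exact hcS) with h | h
          · exact absurd h hcT
          · exact h
        have hlt : key c < key x := mem_dropWhile_pairwise key (key x) S hSpair c hcD
        have hl : (S.takeWhile p ++ x :: S.dropWhile p).idxOf c
            = (S.takeWhile p).length + (1 + (S.dropWhile p).idxOf c) := by
          rw [List.idxOf_append, if_neg hcT]
          have : (x :: S.dropWhile p).idxOf c = (S.dropWhile p).idxOf c + 1 := by
            rw [List.idxOf_cons, beq_false_of_ne (Ne.symm hcne)]
            rfl
          omega
        have hl2 : S.idxOf c = (S.dropWhile p).idxOf c + (S.takeWhile p).length := by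
          conv_lhs => rw [← hTD]
          rw [List.idxOf_append, if_neg hcT]
        have ihv := ih hxs hcx
        rw [hl, if_pos hlt]
        omega
    · -- c = x, the freshly inserted element
      have hcx' : c = x := List.mem_singleton.mp hcx
      subst hcx'
      have hidx : (S.takeWhile p ++ c :: S.dropWhile p).idxOf c = (S.takeWhile p).length := by
        rw [List.idxOf_append, if_neg hxT]
        simp
      rw [hidx, hTlen, hcountS]
      have hidx_new : (xs ++ [c]).idxOf c = xs.length := by
        rw [List.idxOf_append, if_neg hx]
        simp
      rw [hidx_new, List.take_left]
      rw [List.countP_append, countP_not_lt_split key (key c) xs]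
      simp [List.countP_cons]

-- B's rank loop over enumerate splits into "larger count anywhere" + "equal count earlier"
theorem countP_enumerate_rank_aux (key : Char → Int) (c : Char) (xs : List Char) (s i : Nat) :
    (PySem.List.enumerate xs (s : Int)).countP
        (fun q => decide (key c < key q.2 ∨ (key q.2 = key c ∧ q.1 < (i : Int))))
      = xs.countP (fun d => decide (key c < key d))
        + (xs.take (i - s)).countP (fun d => decide (key d = key c)) := by
  induction xs generalizing s with
  | nil => simp [PySem.List.enumerate]
  | cons d xs ih =>
    rw [PySem.List.enumerate_cons]
    have hcast : (s : Int) + 1 = ((s + 1 : Nat) : Int) := by push_cast; ring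
    rw [hcast, List.countP_cons, ih (s + 1)]
    rw [List.countP_cons (l := xs) (p := fun d => decide (key c < key d))]
    by_cases hs : s < i
    · have htake : (d :: xs).take (i - s) = d :: xs.take (i - (s + 1)) := by
        have : i - s = (i - (s + 1)) + 1 := by omega
        rw [this, List.take_succ_cons]
      rw [htake]
      simp only [List.countP_cons]
      rcases lt_trichotomy (key d) (key c) with h | h | h
      · simp [h, ne_of_lt h, not_lt.mpr (le_of_lt h), hs]; try omega
      · simp [h, hs]; try omega
      · simp [h, ne_of_gt h, not_lt.mpr (le_of_lt h), hs]; try omega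
    · have htake : i - s = 0 := by omega
      have htake2 : i - (s + 1) = 0 := by omega
      rw [htake, htake2]
      have hns : ¬ ((s : Int) < (i : Int)) := by exact_mod_cast not_lt.mpr (by omega : i ≤ s)
      rcases lt_trichotomy (key d) (key c) with h | h | h
      · simp [h, not_lt.mpr (le_of_lt h), hns]
      · simp [h, hns]
      · simp [h, ne_of_gt h, hns]

theorem countP_enumerate_rank (key : Char → Int) (c : Char) (xs : List Char) (i : Nat) :
    (PySem.List.enumerate xs 0).countP
        (fun q => decide (key c < key q.2 ∨ (key q.2 = key c ∧ q.1 < (i : Int))))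
      = xs.countP (fun d => decide (key c < key d))
        + (xs.take i).countP (fun d => decide (key d = key c)) := by
  have := countP_enumerate_rank_aux key c xs 0 i
  simpa using this

-- scatter writes at distinct nonnegative positions are order-independent
theorem scatter_perm (ps qs : List (Int × Char)) (h : ps.Perm qs)
    (hnd : (ps.map Prod.fst).Nodup) (hnn : ∀ p ∈ ps, 0 ≤ p.1) (init : List Char) :
    ps.foldl (fun res p => PySem.List.pySetD res p.1 p.2) init
      = qs.foldl (fun res p => PySem.List.pySetD res p.1 p.2) init := by
  induction h generalizing init with
  | nil => rfl
  | cons x h ih =>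
    simp only [List.foldl_cons]
    exact ih (by simpa using (List.nodup_cons.mp (by simpa using hnd)).2)
      (fun p hp => hnn p (List.mem_cons_of_mem x hp)) _
  | swap x y l =>
    simp only [List.foldl_cons]
    have hxy : y.1 ≠ x.1 := by
      have := hnd
      simp only [List.map_cons, List.nodup_cons, List.mem_cons] at this
      exact fun h => this.1 (Or.inl h)
    have hy : (0:Int) ≤ y.1 := hnn y (by simp)
    have hx : (0:Int) ≤ x.1 := hnn x (by simp)
    rw [PySem.List.pySetD_of_nonneg init y.2 hy, PySem.List.pySetD_of_nonneg _ x.2 hx,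
      PySem.List.pySetD_of_nonneg init x.2 hx, PySem.List.pySetD_of_nonneg _ y.2 hy,
      List.set_comm _ _ (by omega)]
  | trans h1 h2 ih1 ih2 =>
    rw [ih1 hnd hnn init, ih2 (by rw [← (h1.map Prod.fst).nodup_iff]; exact hnd)
      (fun p hp => hnn p (h1.mem_iff.mpr hp)) init]

-- ===== VERDICT (by name: the statement is the Claim_ definition above) =====
set_option maxHeartbeats 2000000 in
theorem uoc_find_alphabet_spec : Claim_equal_uoc_find_alphabet := by
  intro message _
  unfold Spec_uoc_find_alphabet
  simp only [uoc_find_alphabet, uoc_find_alphabet_alt]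
  simp only [PySem.Dict.foldl_insert_getD_add_one_eq_counter, PySem.Dict.getD_counter]
  rw [PySem.List.foldl_pyRange_zero_pyGetD pvFreq2 ' '
    (fun d c => d.insert c (find_all_occurrences c message.toList)) PySem.Dict.empty]
  rw [PySem.Dict.items_foldl_insert_fresh (κ := Char) (ν := Int) pvFreq2 (fun c => c)
    (fun c => find_all_occurrences c message.toList) PySem.Dict.empty
    (fun x _ => PySem.Dict.contains_empty _) (by simpa using (by decide : pvFreq2.Nodup))]
  simp only [fao_eq, show (PySem.Dict.empty : PySem.Dict Char Int).items = [] from rfl,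
    List.nil_append]
  rw [sorted_map (fun c => (c, (List.count c message.toList : Int))) pvFreq2
    (fun item => item.2) true]
  dsimp only
  set R := PySem.List.sorted pvFreq2 (fun c => ((List.count c message.toList : Nat) : Int)) true with hRdef
  have hRperm : R.Perm pvFreq2 := PySem.List.sorted_perm pvFreq2 _ true
  have hRnodup : R.Nodup := hRperm.nodup_iff.mpr (by decide)
  have hRlen : R.length = 26 := by rw [hRdef, PySem.List.length_sorted]; rfl
  have hrank : ∀ c ∈ pvFreq2, R.idxOf c =
      pvFreq2.countP (fun d => decide (((List.count c message.toList : Nat) : Int) < ((List.count d message.toList : Nat) : Int)))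
      + (pvFreq2.take (pvFreq2.idxOf c)).countP (fun d => decide (((List.count d message.toList : Nat) : Int) = ((List.count c message.toList : Nat) : Int))) := by
    intro c hc
    rw [hRdef]
    exact idxOf_sorted_rev (fun c => ((List.count c message.toList : Nat) : Int)) pvFreq2
      (by decide) c hc
  clear_value R
  have hid : (List.map (fun c => (c, ((List.count c message.toList : Nat) : Int))) R).map Prod.fst = R := by
    rw [List.map_map]
    show List.map id R = R
    exact List.map_id R
  have hn1 : ((List.map (fun c => (c, ((List.count c message.toList : Nat) : Int))) R).map Prod.fst).Nodup := by
    rw [hid]; exact hRnodup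
  rw [keys_ofList_nodup _ hn1]
  rw [hid]
  rw [PySem.Dict.items_foldl_insert_fresh (κ := Char) (ν := Char) (PySem.List.enumerate R 0)
    (fun p => p.2) (fun p => PySem.List.pyGetD pvFreq2 p.1 ' ') PySem.Dict.empty
    (fun x _ => PySem.Dict.contains_empty _) (by rw [PySem.List.map_snd_enumerate]; exact hRnodup)]
  simp only [show (PySem.Dict.empty : PySem.Dict Char Char).items = [] from rfl, List.nil_append]
  have hn2 : (((PySem.List.sorted ((PySem.List.enumerate R 0).map
      (fun p => (p.2, PySem.List.pyGetD pvFreq2 p.1 ' '))) (fun item => item.2) false)).map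
      Prod.fst).Nodup := by
    refine (((PySem.List.sorted_perm ((PySem.List.enumerate R 0).map
      (fun p => (p.2, PySem.List.pyGetD pvFreq2 p.1 ' '))) (fun item => item.2) false).map
      Prod.fst).nodup_iff).mpr ?_
    have hzs : ((PySem.List.enumerate R 0).map
        (fun p => (p.2, PySem.List.pyGetD pvFreq2 p.1 ' '))).map Prod.fst = R := by
      simp only [List.map_map]
      exact PySem.List.map_snd_enumerate R 0
    rw [hzs]; exact hRnodup
  rw [keys_ofList_nodup _ hn2]
  rw [scatter_eq R hRlen]
  refine congrArg String.mk ?_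
  -- rewrite B's computed rank into the position of the letter in R
  have hbody : ∀ (res : List Char) (p : Int × Char), p ∈ PySem.List.enumerate pvFreq2 0 →
      PySem.List.pySetD res
        (((PySem.List.pyGetD pvFreq2
            ((PySem.List.enumerate pvFreq2 0).foldl
              (fun (r : Int) (q : Int × Char) =>
                if ((List.count q.2 message.toList : Nat) : Int) > ((List.count p.2 message.toList : Nat) : Int) ∨
                   (((List.count q.2 message.toList : Nat) : Int) = ((List.count p.2 message.toList : Nat) : Int) ∧ q.1 < p.1)
                then r + 1 else r) 0) ' ').toNat : Int) - ('A'.toNat : Int)) p.2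
      = PySem.List.pySetD res
          (((PySem.List.pyGetD pvFreq2 ((R.idxOf p.2 : Nat) : Int) ' ').toNat : Int) - ('A'.toNat : Int)) p.2 := by
    intro res p hp
    obtain ⟨k, hk, rfl⟩ := (PySem.List.mem_enumerate_iff pvFreq2 0 p).mp hp
    rw [PySem.List.foldl_ite_add_one
      (fun q : Int × Char => ((List.count q.2 message.toList : Nat) : Int) > ((List.count pvFreq2[k] message.toList : Nat) : Int) ∨
        (((List.count q.2 message.toList : Nat) : Int) = ((List.count pvFreq2[k] message.toList : Nat) : Int) ∧ q.1 < (0 : Int) + (k : Int)))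
      (PySem.List.enumerate pvFreq2 0) 0]
    have hpredeq : (PySem.List.enumerate pvFreq2 0).countP
        (fun q : Int × Char => decide (((List.count q.2 message.toList : Nat) : Int) > ((List.count pvFreq2[k] message.toList : Nat) : Int) ∨
          (((List.count q.2 message.toList : Nat) : Int) = ((List.count pvFreq2[k] message.toList : Nat) : Int) ∧ q.1 < (0 : Int) + (k : Int))))
        = (PySem.List.enumerate pvFreq2 0).countP
        (fun q : Int × Char => decide (((List.count pvFreq2[k] message.toList : Nat) : Int) < ((List.count q.2 message.toList : Nat) : Int) ∨
          (((List.count q.2 message.toList : Nat) : Int) = ((List.count pvFreq2[k] message.toList : Nat) : Int) ∧ q.1 < (k : Int)))) := by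
      refine List.countP_congr ?_
      intro q hq
      simp only [decide_eq_true_eq]
      constructor
      · rintro (h | ⟨h1, h2⟩)
        · exact Or.inl h
        · exact Or.inr ⟨h1, by omega⟩
      · rintro (h | ⟨h1, h2⟩)
        · exact Or.inl h
        · exact Or.inr ⟨h1, by omega⟩
    rw [hpredeq,
      countP_enumerate_rank (fun c => ((List.count c message.toList : Nat) : Int)) pvFreq2[k] pvFreq2 k]
    have hmem : pvFreq2[k] ∈ pvFreq2 := List.getElem_mem _
    have hidx : pvFreq2.idxOf pvFreq2[k] = k := List.Nodup.idxOf_getElem (by decide) k hk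
    have := hrank pvFreq2[k] hmem
    rw [hidx] at this
    rw [← this]
    simp
  rw [PySem.List.foldl_congr_mem (PySem.List.enumerate pvFreq2 0) _ _ (List.replicate 26 ' ') hbody]
  -- both folds are scatters over explicit (position, letter) pair lists
  rw [show (List.foldl (fun res (p : Int × Char) => PySem.List.pySetD res
        (((PySem.List.pyGetD pvFreq2 p.1 ' ').toNat : Int) - ('A'.toNat : Int)) p.2)
        (List.replicate 26 ' ') (PySem.List.enumerate R 0))
      = (((PySem.List.enumerate R 0).map (fun (p : Int × Char) =>
          ((((PySem.List.pyGetD pvFreq2 p.1 ' ').toNat : Int) - ('A'.toNat : Int)), p.2))).foldl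
          (fun res (p : Int × Char) => PySem.List.pySetD res p.1 p.2) (List.replicate 26 ' '))
      from by rw [List.foldl_map]]
  rw [show (List.foldl (fun res (p : Int × Char) => PySem.List.pySetD res
        (((PySem.List.pyGetD pvFreq2 ((R.idxOf p.2 : Nat) : Int) ' ').toNat : Int) - ('A'.toNat : Int)) p.2)
        (List.replicate 26 ' ') (PySem.List.enumerate pvFreq2 0))
      = (((PySem.List.enumerate pvFreq2 0).map (fun (p : Int × Char) =>
          ((((PySem.List.pyGetD pvFreq2 ((R.idxOf p.2 : Nat) : Int) ' ').toNat : Int) - ('A'.toNat : Int)), p.2))).foldl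
          (fun res (p : Int × Char) => PySem.List.pySetD res p.1 p.2) (List.replicate 26 ' '))
      from by rw [List.foldl_map]]
  -- the A-side pair list, rewritten through the letters of R
  have hAlist : (PySem.List.enumerate R 0).map (fun (p : Int × Char) =>
        ((((PySem.List.pyGetD pvFreq2 p.1 ' ').toNat : Int) - ('A'.toNat : Int)), p.2))
      = R.map (fun c => ((((PySem.List.pyGetD pvFreq2 ((R.idxOf c : Nat) : Int) ' ').toNat : Int) - ('A'.toNat : Int)), c)) := by
    have h1 : ∀ p ∈ PySem.List.enumerate R 0,
        ((((PySem.List.pyGetD pvFreq2 p.1 ' ').toNat : Int) - ('A'.toNat : Int)), p.2)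
          = ((((PySem.List.pyGetD pvFreq2 ((R.idxOf p.2 : Nat) : Int) ' ').toNat : Int) - ('A'.toNat : Int)), p.2) := by
      intro p hp
      obtain ⟨k, hk, rfl⟩ := (PySem.List.mem_enumerate_iff R 0 p).mp hp
      have : R.idxOf R[k] = k := List.Nodup.idxOf_getElem hRnodup k hk
      simp [this]
    rw [List.map_congr_left h1]
    have h2 : (fun (p : Int × Char) =>
        ((((PySem.List.pyGetD pvFreq2 ((R.idxOf p.2 : Nat) : Int) ' ').toNat : Int) - ('A'.toNat : Int)), p.2))
        = (fun c => ((((PySem.List.pyGetD pvFreq2 ((R.idxOf c : Nat) : Int) ' ').toNat : Int) - ('A'.toNat : Int)), c)) ∘ (fun (p : Int × Char) => p.2) := rfl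
    rw [h2, ← List.map_map, PySem.List.map_snd_enumerate]
  -- the B-side pair list, rewritten through the letters of pvFreq2
  have hBlist : (PySem.List.enumerate pvFreq2 0).map (fun (p : Int × Char) =>
        ((((PySem.List.pyGetD pvFreq2 ((R.idxOf p.2 : Nat) : Int) ' ').toNat : Int) - ('A'.toNat : Int)), p.2))
      = pvFreq2.map (fun c => ((((PySem.List.pyGetD pvFreq2 ((R.idxOf c : Nat) : Int) ' ').toNat : Int) - ('A'.toNat : Int)), c)) := by
    have h2 : (fun (p : Int × Char) =>
        ((((PySem.List.pyGetD pvFreq2 ((R.idxOf p.2 : Nat) : Int) ' ').toNat : Int) - ('A'.toNat : Int)), p.2))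
        = (fun c => ((((PySem.List.pyGetD pvFreq2 ((R.idxOf c : Nat) : Int) ' ').toNat : Int) - ('A'.toNat : Int)), c)) ∘ (fun (p : Int × Char) => p.2) := rfl
    rw [h2, ← List.map_map, PySem.List.map_snd_enumerate]
  -- positions on the A side are the twenty-six distinct alphabet slots
  have hfst : ((PySem.List.enumerate R 0).map (fun (p : Int × Char) =>
        ((((PySem.List.pyGetD pvFreq2 p.1 ' ').toNat : Int) - ('A'.toNat : Int)), p.2))).map Prod.fst
      = (PySem.List.pyRange 0 (0 + ((26 : Nat) : Int)) 1).map
          (fun i => (((PySem.List.pyGetD pvFreq2 i ' ').toNat : Int) - ('A'.toNat : Int))) := by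
    rw [List.map_map]
    have h1 : (Prod.fst ∘ (fun (p : Int × Char) =>
        ((((PySem.List.pyGetD pvFreq2 p.1 ' ').toNat : Int) - ('A'.toNat : Int)), p.2)))
        = (fun i => (((PySem.List.pyGetD pvFreq2 i ' ').toNat : Int) - ('A'.toNat : Int))) ∘ Prod.fst := rfl
    rw [h1, ← List.map_map, PySem.List.map_fst_enumerate, hRlen]
  apply scatter_perm
  · rw [hAlist, hBlist]
    exact hRperm.map _
  · rw [hfst]
    decide
  · intro p hp
    have hmem := List.mem_map_of_mem (f := Prod.fst) hp
    rw [hfst] at hmem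
    exact (by decide : ∀ x ∈ (PySem.List.pyRange 0 (0 + ((26 : Nat) : Int)) 1).map
      (fun i => (((PySem.List.pyGetD pvFreq2 i ' ').toNat : Int) - ('A'.toNat : Int))), (0:Int) ≤ x) _ hmem
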